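-- pv_equiv track=rewrite | github.com/asmaahasnaoui/Problem_Solving | DynamicProgramming.py | howConstruct
-- ===== SOURCE A (Python) =====
-- def howConstruct(target,wordBank):
--     if target=="":
--         return [[]]
--     allCombination=[]
--     for word in wordBank:
--         if target.startswith(word):
--             suffix=target[len(word):]
--             result= howConstruct(suffix,wordBank)
--             for combination in result:
--                 allCombination.append([word] + combination)
--
--     return allCombination
-- ===== SOURCE B (Python) =====
-- def howConstruct(target, wordBank):
--     # bottom-up DP: each suffix solved once; tables[k] = all decompositions of the suffix of target of length k
--     n = len(target)
--     tables = [[[]]]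
--     for k in range(1, n + 1):
--         suffix = target[n - k:]
--         combos = []
--         for w in wordBank:
--             if len(w) <= k and suffix.startswith(w):
--                 for c in tables[k - len(w)]:
--                     combos.append([w] + c)
--         tables.append(combos)
--     return tables[n]
-- ===== Notes on version B (the rewrite author's own statement) =====
-- stated objective: alternative
-- what changed: replaced A's top-down recursion on the remaining suffix by a bottom-up dynamic program that fills a table of all decompositions per suffix length with an explicit loop, solving each suffix once instead of recomputing it
import Mathlib
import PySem

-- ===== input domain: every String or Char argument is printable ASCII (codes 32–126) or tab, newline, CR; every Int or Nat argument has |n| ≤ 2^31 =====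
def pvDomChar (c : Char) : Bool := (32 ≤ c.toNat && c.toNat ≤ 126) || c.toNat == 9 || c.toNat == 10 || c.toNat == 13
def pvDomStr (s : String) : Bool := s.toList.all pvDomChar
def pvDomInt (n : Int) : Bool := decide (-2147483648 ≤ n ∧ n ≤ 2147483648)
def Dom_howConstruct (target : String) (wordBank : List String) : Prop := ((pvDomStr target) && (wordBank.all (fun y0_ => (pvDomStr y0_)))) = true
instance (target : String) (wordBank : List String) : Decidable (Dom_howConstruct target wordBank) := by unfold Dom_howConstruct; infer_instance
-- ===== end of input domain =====

-- B replaces A's recursion on suffixes by a bottom-up DP table over suffix lengths (each suffix solved once, by an index loop instead of recursion); identical output.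

-- ===== PORT A =====
-- A recurses on the current suffix; fuel (target.length + 1) only makes the recursion
-- total in Lean: it suffices on Pre_ (no empty word in the bank), where every recursive
-- call strictly shortens the suffix exactly as in Python.
def goA (fuel : Nat) (wb : List String) (t : List Char) : List (List String) :=
  match fuel with
  | 0 => []
  | f + 1 =>
    if t = [] then [[]]
    else
      wb.foldl (fun acc w =>
        if w.toList.isPrefixOf t then
          acc ++ (goA f wb (t.drop w.toList.length)).map (fun c => w :: c)
        else acc) []

def howConstruct (target : String) (wordBank : List String) : List (List String) :=
  goA (target.toList.length + 1) wordBank target.toList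

-- ===== PORT B =====
-- combos for the suffix of length k, given the table for all shorter suffixes
def altCombos (wb : List String) (suffix : List Char) (k : Nat)
    (tables : List (List (List String))) : List (List String) :=
  wb.foldl (fun acc w =>
    if w.toList.length ≤ k ∧ w.toList.isPrefixOf suffix then
      acc ++ (tables.getD (k - w.toList.length) []).map (fun c => w :: c)
    else acc) []

-- one iteration of B's loop: append the row for suffix length i+1
def altStep (wb : List String) (L : List Char)
    (tables : List (List (List String))) (i : Nat) : List (List (List String)) :=
  tables ++ [altCombos wb (L.drop (L.length - (i + 1))) (i + 1) tables]

def howConstruct_alt (target : String) (wordBank : List String) : List (List String) :=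
  ((List.range target.toList.length).foldl (altStep wordBank target.toList)
    [[[]]]).getD target.toList.length []

-- ===== PRECONDITION & SPEC =====
-- Pre_ excludes banks containing "" with a nonempty target: there Python A recurses
-- forever on the same target (RecursionError) and Python B raises IndexError.
def Pre_howConstruct (target : String) (wordBank : List String) : Prop :=
  target = "" ∨ "" ∉ wordBank
instance (target : String) (wordBank : List String) : Decidable (Pre_howConstruct target wordBank) := by unfold Pre_howConstruct; infer_instance

def pvWitness_howConstruct : String × List String := ("abab", ["a", "b", "ab"])

def Spec_howConstruct (target : String) (wordBank : List String) (out : List (List String)) : Prop := out = howConstruct_alt target wordBank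
instance (target : String) (wordBank : List String) (out : List (List String)) : Decidable (Spec_howConstruct target wordBank out) := by unfold Spec_howConstruct; infer_instance

-- ===== CLAIM (what is proved, stated in full; the proofs are below) =====
def Claim_equal_howConstruct : Prop := ∀ (target : String) (wordBank : List String), Dom_howConstruct target wordBank → Pre_howConstruct target wordBank → Spec_howConstruct target wordBank (howConstruct target wordBank)

-- ===== LEMMAS AND PROOFS =====

theorem str_toList_ne_nil {w : String} (h : w ≠ "") : w.toList ≠ [] := by
  simpa [String.toList_eq_nil_iff] using h

-- fuel irrelevance for A when the bank has no empty word
theorem goA_fuel_congr (wb : List String) (hwb : "" ∉ wb) :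
    ∀ (f g : Nat) (t : List Char), t.length < f → t.length < g →
      goA f wb t = goA g wb t := by
  intro f
  induction f with
  | zero => intro g t hf; omega
  | succ f ih =>
    intro g t hf hg
    cases g with
    | zero => omega
    | succ g =>
      by_cases ht : t = []
      · simp [goA, ht]
      · simp only [goA, if_neg ht]
        refine PySem.List.foldl_congr_mem _ _ _ _ (fun acc w hw => ?_)
        by_cases hp : w.toList.isPrefixOf t
        · have hwne : w.toList ≠ [] := str_toList_ne_nil (fun h => hwb (h ▸ hw))
          have hlen : w.toList.length ≤ t.length :=
            (List.isPrefixOf_iff_prefix.mp hp).length_le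
          have h1 : (t.drop w.toList.length).length < f := by
            have : 0 < w.toList.length := List.length_pos_iff.mpr hwne
            simp only [List.length_drop]; omega
          have h2 : (t.drop w.toList.length).length < g := by
            have : 0 < w.toList.length := List.length_pos_iff.mpr hwne
            simp only [List.length_drop]; omega
          rw [if_pos hp, if_pos hp, ih g (t.drop w.toList.length) h1 h2]
        · simp [hp]

-- B's row k equals A's value on the suffix of length k
theorem altCombos_eq (wb : List String) (L : List Char) (hwb : "" ∉ wb)
    (k : Nat) (hk1 : 1 ≤ k) (hk : k ≤ L.length) :
    altCombos wb (L.drop (L.length - k)) k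
        ((List.range k).map (fun j => goA (j + 1) wb (L.drop (L.length - j))))
      = goA (k + 1) wb (L.drop (L.length - k)) := by
  have hslen : (L.drop (L.length - k)).length = k := by
    simp only [List.length_drop]; omega
  have hne : L.drop (L.length - k) ≠ [] := by
    intro h; rw [h] at hslen; simp at hslen; omega
  conv_rhs => rw [goA]
  rw [if_neg hne]
  unfold altCombos
  refine PySem.List.foldl_congr_mem _ _ _ _ (fun acc w hw => ?_)
  by_cases hp : w.toList.isPrefixOf (L.drop (L.length - k))
  · have hwne : w.toList ≠ [] := str_toList_ne_nil (fun h => hwb (h ▸ hw))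
    have hwpos : 0 < w.toList.length := List.length_pos_iff.mpr hwne
    have hlen : w.toList.length ≤ k := by
      have := (List.isPrefixOf_iff_prefix.mp hp).length_le
      rwa [hslen] at this
    rw [if_pos ⟨hlen, hp⟩, if_pos hp]
    have hidx : k - w.toList.length < k := by omega
    have hget :
        ((List.range k).map (fun j => goA (j + 1) wb (L.drop (L.length - j)))).getD
            (k - w.toList.length) []
          = goA (k - w.toList.length + 1) wb (L.drop (L.length - (k - w.toList.length))) := by
      rw [List.getD_eq_getElem?_getD, List.getElem?_map,
        List.getElem?_range hidx]
      rfl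
    have hdrop : (L.drop (L.length - k)).drop w.toList.length
        = L.drop (L.length - (k - w.toList.length)) := by
      rw [List.drop_drop]
      congr 1
      omega
    have hdlen : (L.drop (L.length - (k - w.toList.length))).length
        = k - w.toList.length := by
      simp only [List.length_drop]; omega
    rw [hget, hdrop,
      goA_fuel_congr wb hwb k (k - w.toList.length + 1)
        (L.drop (L.length - (k - w.toList.length)))
        (by rw [hdlen]; omega) (by rw [hdlen]; omega)]
  · rw [if_neg (fun h => hp h.2), if_neg hp]

-- the table after m iterations is the list of A-values for suffix lengths 0..m
theorem tables_inv (wb : List String) (L : List Char) (hwb : "" ∉ wb) :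
    ∀ (m : Nat), m ≤ L.length →
      (List.range m).foldl (altStep wb L) [[[]]]
        = (List.range (m + 1)).map (fun j => goA (j + 1) wb (L.drop (L.length - j))) := by
  intro m
  induction m with
  | zero =>
    intro _
    simp [List.range_succ, goA]
  | succ m ih =>
    intro hm
    rw [List.range_succ, List.foldl_append, ih (by omega)]
    simp only [List.foldl_cons, List.foldl_nil]
    unfold altStep
    rw [altCombos_eq wb L hwb (m + 1) (by omega) hm]
    rw [List.range_succ (n := m + 1), List.map_append]
    rfl

-- ===== VERDICT (by name: the statement is the Claim_ definition above) =====
theorem howConstruct_spec : Claim_equal_howConstruct := by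
  intro target wordBank _ hpre
  unfold Spec_howConstruct howConstruct howConstruct_alt
  rcases hpre with h | h
  · subst h
    simp [goA]
  · rw [tables_inv wordBank target.toList h target.toList.length le_rfl]
    rw [List.getD_eq_getElem?_getD, List.getElem?_map,
      List.getElem?_range (by omega)]
    simp
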